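-- pv_equiv track=rewrite | github.com/juhongyee/baekjoon | 250 카드 구매하기 3/카드 구매하기 3.py | solve
-- ===== SOURCE A (Python) =====
-- from collections import deque
--
-- def solve(N,arr):
--     stack_max = deque()
--     ans_max = arr[0]
--     last_cal = arr[0]
--     stack_max.append((arr[0],0))
--     for i in range(1,N):
--         val = (arr[i],i)
--
--         if stack_max and stack_max[-1][0]>=val[0]:
--             last_cal += val[0]
--             stack_max.append(val)
--             ans_max += last_cal
--         else:
--             if(stack_max and stack_max[-1][0]<val[0]):
--                 last_cal += val[0]
--
--             before = stack_max[-1] #나 자신을 pop한거에서 빼는 거리로 시작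
--
--             while stack_max and stack_max[-1][0]<val[0]:
--                 now = stack_max.pop()
--                 last_cal += (val[0]-before[0])*(before[1]-now[1])
--                 before = now
--
--             if(not stack_max):
--                 last_cal += (val[0]-before[0])*(now[1]+1)
--             else:
--                 last_cal += (val[0]-before[0])*(before[1]-stack_max[-1][1])
--
--             ans_max += last_cal
--             stack_max.append(val)
--
--     stack_min = deque()
--     ans_min = arr[0]
--     last_cal = arr[0]
--     stack_min.append((arr[0],0))
--
--     for i in range(1,N):
--         val = (arr[i],i)
--
--         if stack_min and stack_min[-1][0]<=val[0]:
--             last_cal += val[0]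
--             stack_min.append(val)
--             ans_min += last_cal
--         else:
--             if(stack_min and stack_min[-1][0]>val[0]):
--                 last_cal += val[0]
--
--             before = stack_min[-1] #나 자신을 pop한거에서 빼는 거리로 시작
--
--             while stack_min and stack_min[-1][0]>val[0]:
--                 now = stack_min.pop()
--                 last_cal += (val[0]-before[0])*(before[1]-now[1])
--                 before = now
--             if(not stack_min):
--                 last_cal += (val[0]-before[0])*(now[1]+1)
--             else:
--                 last_cal += (val[0]-before[0])*(before[1]-stack_min[-1][1])
--
--             ans_min += last_cal
--             stack_min.append(val)
--
--     return ans_max,ans_min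
-- ===== SOURCE B (Python) =====
-- def _prev(vals, n, jump_while):
--     # res[k] = largest j < k with NOT jump_while(vals[j], vals[k]), else -1,
--     # found by chasing earlier results (pointer jumping)
--     res = []
--     for k in range(n):
--         j = k - 1
--         while j >= 0 and jump_while(vals[j], vals[k]):
--             j = res[j]
--         res.append(j)
--     return res
--
--
-- def solve(N, arr):
--     n = max(N, 1)  # at least the first card is always counted
--     rev = list(reversed(arr[:n]))
--     pge = _prev(arr, n, lambda a, b: a < b)    # previous index with value >= current
--     ple = _prev(arr, n, lambda a, b: a > b)    # previous index with value <= current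
--     rgt = _prev(rev, n, lambda a, b: a <= b)   # on reversed: previous with value >  current
--     rlt = _prev(rev, n, lambda a, b: a >= b)   # on reversed: previous with value <  current
--     ans_max = 0
--     ans_min = 0
--     for k in range(n):
--         ngt = n - 1 - rgt[n - 1 - k]  # next index with value > arr[k], else n
--         nlt = n - 1 - rlt[n - 1 - k]  # next index with value < arr[k], else n
--         ans_max += arr[k] * (k - pge[k]) * (ngt - k)
--         ans_min += arr[k] * (k - ple[k]) * (nlt - k)
--     return ans_max, ans_min
-- ===== Notes on version B (the rewrite author's own statement) =====
-- stated objective: alternative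
-- what changed: Replaced A's incremental stack bookkeeping (running per-prefix sums patched while popping) by the span-contribution method: for every index find the previous greater-or-equal and next strictly-greater positions (pointer-jumping over previously computed answers, on the reversed array for the right side) and sum value*left_span*right_span, and dually for minima.
import Mathlib
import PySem

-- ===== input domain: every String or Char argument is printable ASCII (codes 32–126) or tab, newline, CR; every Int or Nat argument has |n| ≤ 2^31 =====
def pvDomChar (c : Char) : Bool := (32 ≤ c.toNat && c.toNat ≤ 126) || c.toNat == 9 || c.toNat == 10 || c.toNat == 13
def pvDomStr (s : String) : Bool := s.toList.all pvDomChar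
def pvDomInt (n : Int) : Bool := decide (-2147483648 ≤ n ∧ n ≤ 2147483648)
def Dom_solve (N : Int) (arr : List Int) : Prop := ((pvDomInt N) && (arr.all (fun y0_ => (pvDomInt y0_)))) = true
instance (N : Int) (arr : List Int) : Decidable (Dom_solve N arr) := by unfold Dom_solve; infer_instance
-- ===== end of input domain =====

-- B replaces A's incremental stack bookkeeping by the span-contribution method:
-- each index contributes value*left_span*right_span, the spans found by pointer
-- jumping over previously computed answers (same cost, different algorithm).

-- ===== PORT A =====
-- The deque is a list with head = top (append = cons, [-1] = head, pop = uncons).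
-- Python's `now` is unassigned before the while loop; the port seeds it with `before`,
-- and it is only read after the loop body ran at least once (always, on executions A reaches).
def popMax (x : Int) : List (Int × Int) → (Int × Int) → (Int × Int) → Int →
    List (Int × Int) × (Int × Int) × (Int × Int) × Int
  | [], before, now, lc => ([], before, now, lc)
  | (v, p) :: rest, before, _now, lc =>
      if v < x then popMax x rest (v, p) (v, p) (lc + (x - before.1) * (before.2 - p))
      else ((v, p) :: rest, before, _now, lc)

def stepMax (arr : List Int) (st : List (Int × Int) × Int × Int) (i : Int) :
    List (Int × Int) × Int × Int :=
  let x := PySem.List.pyGetD arr i 0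
  match st with
  | (stack, ans, lc) =>
    match stack with
    | [] => ([(x, i)], ans, lc)  -- unreachable: the stack is never empty (Python would raise on stack_max[-1])
    | (v, p) :: rest =>
      if v ≥ x then
        ((x, i) :: (v, p) :: rest, ans + (lc + x), lc + x)
      else
        let lc1 := if v < x then lc + x else lc
        let before := (v, p)
        match popMax x ((v, p) :: rest) before before lc1 with
        | (stack', before', now', lc2) =>
          let lc3 := if stack' = [] then lc2 + (x - before'.1) * (now'.2 + 1)
                     else lc2 + (x - before'.1) * (before'.2 - (stack'.headD (0, 0)).2)
          ((x, i) :: stack', ans + lc3, lc3)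

def popMin (x : Int) : List (Int × Int) → (Int × Int) → (Int × Int) → Int →
    List (Int × Int) × (Int × Int) × (Int × Int) × Int
  | [], before, now, lc => ([], before, now, lc)
  | (v, p) :: rest, before, _now, lc =>
      if v > x then popMin x rest (v, p) (v, p) (lc + (x - before.1) * (before.2 - p))
      else ((v, p) :: rest, before, _now, lc)

def stepMin (arr : List Int) (st : List (Int × Int) × Int × Int) (i : Int) :
    List (Int × Int) × Int × Int :=
  let x := PySem.List.pyGetD arr i 0
  match st with
  | (stack, ans, lc) =>
    match stack with
    | [] => ([(x, i)], ans, lc)  -- unreachable, as in stepMax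
    | (v, p) :: rest =>
      if v ≤ x then
        ((x, i) :: (v, p) :: rest, ans + (lc + x), lc + x)
      else
        let lc1 := if v > x then lc + x else lc
        let before := (v, p)
        match popMin x ((v, p) :: rest) before before lc1 with
        | (stack', before', now', lc2) =>
          let lc3 := if stack' = [] then lc2 + (x - before'.1) * (now'.2 + 1)
                     else lc2 + (x - before'.1) * (before'.2 - (stack'.headD (0, 0)).2)
          ((x, i) :: stack', ans + lc3, lc3)

def solve (N : Int) (arr : List Int) : Int × Int :=
  let a0 := PySem.List.pyGetD arr 0 0   -- arr[0]; Pre_ guarantees arr ≠ []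
  match (PySem.List.pyRange 1 N 1).foldl (stepMax arr) ([(a0, 0)], a0, a0) with
  | (_, ansMax, _) =>
    match (PySem.List.pyRange 1 N 1).foldl (stepMin arr) ([(a0, 0)], a0, a0) with
    | (_, ansMin, _) => (ansMax, ansMin)

-- ===== PORT B =====
def jump (less : Int → Int → Bool) (vals res : List Int) (x : Int) : Nat → Int → Int
  | 0, j => j          -- fuel guard only: j strictly decreases, so fuel k+1 is never exhausted
  | fuel + 1, j =>
    if 0 ≤ j ∧ less (PySem.List.pyGetD vals j 0) x
    then jump less vals res x fuel (PySem.List.pyGetD res j 0)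
    else j

def prevSpan (less : Int → Int → Bool) (vals : List Int) (n : Int) : List Int :=
  (PySem.List.pyRange 0 n 1).foldl
    (fun res k =>
      let x := PySem.List.pyGetD vals k 0
      res ++ [jump less vals res x (k + 1).toNat (k - 1)])
    []

def solve_alt (N : Int) (arr : List Int) : Int × Int :=
  let n := max N 1
  let rev := (PySem.List.slice arr none (some n)).reverse
  let pge := prevSpan (fun a b => a < b) arr n
  let ple := prevSpan (fun a b => a > b) arr n
  let rgt := prevSpan (fun a b => a ≤ b) rev n
  let rlt := prevSpan (fun a b => a ≥ b) rev n
  (PySem.List.pyRange 0 n 1).foldl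
    (fun acc k =>
      let ngt := n - 1 - PySem.List.pyGetD rgt (n - 1 - k) 0
      let nlt := n - 1 - PySem.List.pyGetD rlt (n - 1 - k) 0
      (acc.1 + PySem.List.pyGetD arr k 0 * (k - PySem.List.pyGetD pge k 0) * (ngt - k),
       acc.2 + PySem.List.pyGetD arr k 0 * (k - PySem.List.pyGetD ple k 0) * (nlt - k)))
    (0, 0)

-- ===== PRECONDITION & SPEC =====
-- Pre_ admits exactly the inputs on which Python A returns: for arr = [] or N > len(arr)
-- A raises IndexError (arr[0], resp. arr[i] inside the loop).
def Pre_solve (N : Int) (arr : List Int) : Prop := arr ≠ [] ∧ N ≤ (arr.length : Int)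
instance (N : Int) (arr : List Int) : Decidable (Pre_solve N arr) := by unfold Pre_solve; infer_instance

def pvWitness_solve : Int × List Int := (3, [1, 3, 2])

def Spec_solve (N : Int) (arr : List Int) (out : Int × Int) : Prop := out = solve_alt N arr
instance (N : Int) (arr : List Int) (out : Int × Int) : Decidable (Spec_solve N arr out) := by unfold Spec_solve; infer_instance

-- ===== CLAIM (what is proved, stated in full; the proofs are below) =====
def Claim_equal_solve : Prop := ∀ (N : Int) (arr : List Int), Dom_solve N arr → Pre_solve N arr → Spec_solve N arr (solve N arr)

-- ===== LEMMAS AND PROOFS =====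

-- f n = arr[n] (the indexing both ports perform)
def idxF (arr : List Int) : Nat → Int := fun n => PySem.List.pyGetD arr (n : Int) 0

-- max / min of f s, f (s+1), …, f (s+d)
def mxUp (f : Nat → Int) (s : Nat) : Nat → Int
  | 0 => f s
  | d + 1 => max (mxUp f s d) (f (s + d + 1))

-- position of the stack top (-1 for the empty stack)
def posTop : List (Int × Int) → Int
  | [] => -1
  | e :: _ => e.2

-- the weighted sum a stack encodes: Σ value · (own position − next position)
def Wsum : List (Int × Int) → Int
  | [] => 0
  | e :: rest => e.1 * (e.2 - posTop rest) + Wsum rest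

-- value covering start s: first entry (from the top) whose successor lies strictly below s
def lookV (s : Int) : List (Int × Int) → Int
  | [] => 0
  | e :: rest => if posTop rest < s then e.1 else lookV s rest

def dW (x : Int) (S : List (Int × Int)) : List (Int × Int) := S.dropWhile (fun e => e.1 < x)

-- the stack A's max-pass holds after processing indices 0..t
def model (f : Nat → Int) : Nat → List (Int × Int)
  | 0 => [(f 0, 0)]
  | t + 1 => (f (t + 1), ((t : Int) + 1)) :: dW (f (t + 1)) (model f t)

-- well-formed stack: positions strictly decrease and values weakly increase from the top; positions ≥ 0
def goodS (S : List (Int × Int)) : Prop :=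
  List.IsChain (fun a b => b.2 < a.2 ∧ a.1 ≤ b.1) S ∧ ∀ e ∈ S, 0 ≤ e.2

theorem dW_cons (x v p : Int) (rest : List (Int × Int)) :
    dW x ((v, p) :: rest) = if v < x then dW x rest else (v, p) :: rest := by
  simp [dW, List.dropWhile_cons]

theorem goodS_tail (e : Int × Int) (rest : List (Int × Int)) (h : goodS (e :: rest)) :
    goodS rest :=
  ⟨h.1.of_cons, fun e' he' => h.2 e' (List.mem_cons_of_mem _ he')⟩

theorem posTop_cons (v p : Int) (rest : List (Int × Int)) :
    posTop ((v, p) :: rest) = p := rfl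

theorem Wsum_cons (v p : Int) (rest : List (Int × Int)) :
    Wsum ((v, p) :: rest) = v * (p - posTop rest) + Wsum rest := rfl

theorem neg_one_le_posTop (S : List (Int × Int)) (h : goodS S) : -1 ≤ posTop S := by
  cases S with
  | nil => simp [posTop]
  | cons e r =>
    have h1 := h.2 e List.mem_cons_self
    have h2 : posTop (e :: r) = e.2 := rfl
    omega

theorem posTop_lt_of_goodS (v p : Int) (rest : List (Int × Int)) (h : goodS ((v, p) :: rest)) :
    posTop rest < p := by
  cases rest with
  | nil =>
    have := h.2 (v, p) List.mem_cons_self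
    simp only [posTop]; omega
  | cons e2 r2 =>
    have := (List.isChain_cons_cons.mp h.1).1
    simpa [posTop] using this.1

theorem goodS_dW (x : Int) (S : List (Int × Int)) (h : goodS S) : goodS (dW x S) :=
  ⟨h.1.suffix (List.dropWhile_suffix _),
   fun e he => h.2 e ((List.dropWhile_suffix _).subset he)⟩

theorem posTop_dW_le (x : Int) (S : List (Int × Int)) (h : goodS S) :
    posTop (dW x S) ≤ posTop S := by
  induction S with
  | nil => simp [dW, posTop]
  | cons e rest ih =>
    obtain ⟨v, p⟩ := e
    rw [dW_cons]
    by_cases hv : v < x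
    · rw [if_pos hv]
      have h1 := ih (goodS_tail _ _ h)
      have h2 := posTop_lt_of_goodS v p rest h
      rw [posTop_cons]
      omega
    · rw [if_neg hv]
theorem dW_head_ge (x : Int) (S : List (Int × Int)) (e : Int × Int) (r : List (Int × Int))
    (h : dW x S = e :: r) : x ≤ e.1 := by
  induction S with
  | nil => simp [dW] at h
  | cons e0 rest ih =>
    obtain ⟨v, p⟩ := e0
    rw [dW_cons] at h
    by_cases hv : v < x
    · rw [if_pos hv] at h; exact ih h
    · rw [if_neg hv] at h
      cases h
      simpa using not_lt.mp hv

theorem lookV_dropped (x s : Int) (S : List (Int × Int)) (hd : posTop (dW x S) < s)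
    (h0 : 0 ≤ s) (hle : s ≤ posTop S) : lookV s S < x := by
  induction S with
  | nil => simp only [posTop] at hle; omega
  | cons e rest ih =>
    obtain ⟨v, p⟩ := e
    rw [dW_cons] at hd
    by_cases hv : v < x
    · rw [if_pos hv] at hd
      simp only [lookV]
      by_cases hs : posTop rest < s
      · rwa [if_pos hs]
      · rw [if_neg hs]
        exact ih hd (by omega)
    · rw [if_neg hv] at hd
      simp only [posTop] at hd hle
      omega

theorem lookV_kept (x s : Int) (S : List (Int × Int)) (hg : goodS S)
    (hs : s ≤ posTop (dW x S)) : lookV s (dW x S) = lookV s S := by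
  induction S with
  | nil => rfl
  | cons e rest ih =>
    obtain ⟨v, p⟩ := e
    rw [dW_cons] at hs ⊢
    by_cases hv : v < x
    · rw [if_pos hv] at hs ⊢
      have htail := goodS_tail _ _ hg
      have h1 := posTop_dW_le x rest htail
      rw [ih htail hs]
      simp only [lookV]
      rw [if_neg (by omega)]
    · rw [if_neg hv]

theorem lookV_ge_head (s v p : Int) (rest : List (Int × Int))
    (hg : goodS ((v, p) :: rest)) (h0 : 0 ≤ s) : v ≤ lookV s ((v, p) :: rest) := by
  induction rest generalizing v p with
  | nil => simp only [lookV, posTop]; rw [if_pos (by omega)]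
  | cons e2 r ih =>
    obtain ⟨v2, p2⟩ := e2
    simp only [lookV]
    by_cases hs : posTop ((v2, p2) :: r) < s
    · rw [if_pos hs]
    · rw [if_neg hs]
      have hv2 : v ≤ v2 := (List.isChain_cons_cons.mp hg.1).1.2
      have := ih v2 p2 (goodS_tail _ _ hg)
      simp only [lookV] at this ⊢
      omega

theorem model_pos_le (f : Nat → Int) (t : Nat) : ∀ e ∈ model f t, e.2 ≤ (t : Int) := by
  induction t with
  | zero => intro e he; simp [model] at he; simp [he]
  | succ t ih =>
    intro e he
    simp only [model, List.mem_cons] at he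
    rcases he with rfl | he
    · push_cast; simp
    · have := ih e ((List.dropWhile_suffix _).subset he)
      push_cast; omega

theorem model_good (f : Nat → Int) (t : Nat) : goodS (model f t) := by
  induction t with
  | zero => exact ⟨by simp [model], by intro e he; simp [model] at he; simp [he]⟩
  | succ t ih =>
    constructor
    · show List.IsChain _ ((f (t + 1), ((t : Int) + 1)) :: dW (f (t + 1)) (model f t))
      cases hD : dW (f (t + 1)) (model f t) with
      | nil => simp
      | cons e r =>
        rw [List.isChain_cons_cons]
        refine ⟨⟨?_, ?_⟩, ?_⟩
        · have := model_pos_le f t e (((List.dropWhile_suffix _).subset) (hD ▸ List.mem_cons_self))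
          omega
        · exact dW_head_ge _ _ _ _ hD
        · have := (goodS_dW (f (t + 1)) _ ih).1
          rwa [hD] at this
    · intro e he
      simp only [model, List.mem_cons] at he
      rcases he with rfl | he
      · simp; omega
      · exact ih.2 e ((List.dropWhile_suffix _).subset he)

theorem model_posTop (f : Nat → Int) (t : Nat) : posTop (model f t) = (t : Int) := by
  cases t <;> simp [model, posTop]

theorem lookV_model (f : Nat → Int) (t : Nat) : ∀ s : Nat, s ≤ t →
    mxUp f s (t - s) = lookV (s : Int) (model f t) := by
  induction t with
  | zero =>
    intro s hs
    interval_cases s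
    simp [mxUp, lookV, posTop, model]
  | succ t ih =>
    intro s hs
    have hDle : posTop (dW (f (t + 1)) (model f t)) ≤ (t : Int) := by
      have := posTop_dW_le (f (t + 1)) (model f t) (model_good f t)
      rwa [model_posTop] at this
    rcases Nat.eq_or_lt_of_le hs with rfl | hlt
    · simp only [Nat.sub_self, mxUp, model, lookV]
      rw [if_pos (by push_cast; omega)]
    · have hst : s ≤ t := by omega
      have hsub : t + 1 - s = (t - s) + 1 := by omega
      rw [hsub]
      have harg : s + (t - s) + 1 = t + 1 := by omega
      simp only [mxUp, harg, model, lookV]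
      rw [ih s hst]
      by_cases hc : posTop (dW (f (t + 1)) (model f t)) < (s : Int)
      · rw [if_pos hc]
        have hdrop := lookV_dropped (f (t + 1)) (s : Int) (model f t) hc (by positivity)
          (by rw [model_posTop]; exact_mod_cast hst)
        omega
      · rw [if_neg hc]
        rw [lookV_kept _ _ _ (model_good f t) (by omega)]
        -- x ≤ lookV s D, so max picks the left argument
        cases hD : dW (f (t + 1)) (model f t) with
        | nil => rw [hD] at hc; simp [posTop] at hc; omega
        | cons e r =>
          obtain ⟨v0, p0⟩ := e
          have hge : f (t + 1) ≤ v0 := dW_head_ge _ _ _ _ hD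
          have hgood : goodS ((v0, p0) :: r) := hD ▸ goodS_dW _ _ (model_good f t)
          have hlk := lookV_ge_head (s : Int) v0 p0 r hgood (by positivity)
          rw [← lookV_kept (f (t+1)) _ _ (model_good f t) (by omega), hD] at *
          omega

theorem popMax_run (x : Int) (S : List (Int × Int)) : ∀ (b : Int × Int) (lc : Int),
    ∃ b' lc2, popMax x S b b lc = (dW x S, b', b', lc2) ∧
      (if dW x S = [] then lc2 + (x - b'.1) * (b'.2 + 1)
       else lc2 + (x - b'.1) * (b'.2 - ((dW x S).headD (0, 0)).2))
      = lc + (x - b.1) * b.2 + b.1 * posTop S - (Wsum S - Wsum (dW x S)) - x * posTop (dW x S) := by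
  induction S with
  | nil =>
    intro b lc
    refine ⟨b, lc, rfl, ?_⟩
    simp [dW, Wsum, posTop]
    ring
  | cons e rest ih =>
    intro b lc
    obtain ⟨v, p⟩ := e
    by_cases hv : v < x
    · obtain ⟨b', lc2, heq, hval⟩ := ih (v, p) (lc + (x - b.1) * (b.2 - p))
      refine ⟨b', lc2, ?_, ?_⟩
      · rw [dW_cons, if_pos hv]
        simpa [popMax, hv] using heq
      · rw [dW_cons, if_pos hv] at *
        rw [hval]
        simp only [Wsum, posTop]
        ring
    · refine ⟨b, lc, ?_, ?_⟩
      · rw [dW_cons, if_neg hv]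
        simp [popMax, hv]
      · rw [dW_cons, if_neg hv]
        rw [if_neg (by simp)]
        simp only [Wsum, posTop, List.headD_cons]
        ring

theorem model_cons (f : Nat → Int) (t : Nat) :
    ∃ v rest, model f t = (v, (t : Int)) :: rest := by
  cases t with
  | zero => exact ⟨f 0, [], rfl⟩
  | succ t =>
    refine ⟨f (t + 1), dW (f (t + 1)) (model f t), ?_⟩
    have hc : ((t + 1 : Nat) : Int) = (t : Int) + 1 := by push_cast; ring
    rw [hc]
    rfl
theorem pyGetD_succ_idxF (arr : List Int) (t : Nat) :
    PySem.List.pyGetD arr ((t : Int) + 1) 0 = idxF arr (t + 1) := by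
  have : ((t : Int) + 1) = ((t + 1 : Nat) : Int) := by push_cast; ring
  rw [this]; rfl

theorem stepMax_model (arr : List Int) (t : Nat) (A : Int) :
    stepMax arr (model (idxF arr) t, A, Wsum (model (idxF arr) t)) ((t : Int) + 1)
      = (model (idxF arr) (t + 1), A + Wsum (model (idxF arr) (t + 1)),
         Wsum (model (idxF arr) (t + 1))) := by
  set f := idxF arr with hf
  obtain ⟨v, rest, hM⟩ := model_cons f t
  have hx : PySem.List.pyGetD arr ((t : Int) + 1) 0 = f (t + 1) := pyGetD_succ_idxF arr t
  have hMt1 : model f (t + 1) = (f (t + 1), ((t : Int) + 1)) :: dW (f (t + 1)) (model f t) := rfl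
  by_cases hge : v ≥ f (t + 1)
  · have hD : dW (f (t + 1)) (model f t) = model f t := by
      rw [hM, dW_cons, if_neg (by omega), ← hM]
    have hW : Wsum (model f (t + 1)) = Wsum (model f t) + f (t + 1) := by
      rw [hMt1, hD, Wsum_cons, model_posTop]
      ring
    simp only [stepMax, hx, hM]
    rw [if_pos (by omega), ← hM, hW, hMt1, hD]
  · have hlt : v < f (t + 1) := by omega
    obtain ⟨b', lc2, heq, hval⟩ :=
      popMax_run (f (t + 1)) ((v, (t : Int)) :: rest) (v, (t : Int))
        (Wsum ((v, (t : Int)) :: rest) + f (t + 1))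
    have hWt1 : Wsum (model f (t + 1))
        = f (t + 1) * (((t : Int) + 1) - posTop (dW (f (t + 1)) (model f t)))
          + Wsum (dW (f (t + 1)) (model f t)) := by
      rw [hMt1, Wsum_cons]
    simp only [stepMax, hx, hM]
    rw [if_neg (by omega), if_pos hlt, heq]
    dsimp only
    have hD2 : dW (f (t + 1)) ((v, (t : Int)) :: rest) = dW (f (t + 1)) (model f t) := by
      rw [hM]
    have hps : posTop ((v, (t : Int)) :: rest) = (t : Int) := rfl
    dsimp only at hval
    rw [hD2, hps, ← hM] at hval
    rw [hD2, hval, hWt1, hMt1]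
    simp only [Prod.mk.injEq]
    refine ⟨?_, ?_, ?_⟩ <;> first | rfl | trivial | ring
theorem foldA (arr : List Int) (n : Nat) :
    (PySem.List.pyRange 1 ((n : Int) + 1) 1).foldl (stepMax arr)
        ([(idxF arr 0, 0)], idxF arr 0, idxF arr 0)
      = (model (idxF arr) n, ∑ t ∈ Finset.range (n + 1), Wsum (model (idxF arr) t),
         Wsum (model (idxF arr) n)) := by
  induction n with
  | zero =>
    rw [PySem.List.pyRange_one_eq_nil (by norm_num)]
    simp [model, Wsum, posTop]
  | succ n ih =>
    have hcast : ((n + 1 : Nat) : Int) + 1 = ((n : Int) + 1) + 1 := by push_cast; ring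
    rw [hcast, PySem.List.pyRange_one_succ_right (by omega), List.foldl_append]
    rw [ih]
    simp only [List.foldl_cons, List.foldl_nil]
    rw [stepMax_model arr n,
        Finset.sum_range_succ (fun t => Wsum (model (idxF arr) t)) (n + 1)]
-- ===== the min pass is the max pass on the negated array =====

def negE (e : Int × Int) : Int × Int := (-e.1, e.2)
def negL (S : List (Int × Int)) : List (Int × Int) := S.map negE
def negSt (st : List (Int × Int) × Int × Int) : List (Int × Int) × Int × Int :=
  (negL st.1, -st.2.1, -st.2.2)

theorem popMin_neg (x : Int) (S : List (Int × Int)) : ∀ (b n : Int × Int) (lc : Int),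
    popMax (-x) (negL S) (negE b) (negE n) (-lc)
      = (negL (popMin x S b n lc).1, negE (popMin x S b n lc).2.1,
         negE (popMin x S b n lc).2.2.1, -(popMin x S b n lc).2.2.2) := by
  induction S with
  | nil => intro b n lc; rfl
  | cons e rest ih =>
    intro b n lc
    obtain ⟨v, p⟩ := e
    simp only [negL, List.map_cons, negE, popMax, popMin]
    by_cases hv : v > x
    · rw [if_pos (by omega : -v < -x), if_pos hv]
      have := ih (v, p) (v, p) (lc + (x - b.1) * (b.2 - p))
      simp only [negL, negE] at this ⊢
      have harith : -lc + (-x - -b.1) * (b.2 - p) = -(lc + (x - b.1) * (b.2 - p)) := by ring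
      rw [harith, this]
    · rw [if_neg (by omega : ¬ (-v < -x)), if_neg hv]
      simp [negE]

theorem pyGetD_neg_map (arr : List Int) (i : Int) :
    PySem.List.pyGetD (arr.map (fun a => -a)) i 0 = -(PySem.List.pyGetD arr i 0) := by
  have h := PySem.List.pyGetD_map (fun a => -a) arr i 0
  simpa using h

theorem stepMin_neg (arr : List Int) (st : List (Int × Int) × Int × Int) (i : Int) :
    stepMax (arr.map (fun a => -a)) (negSt st) i = negSt (stepMin arr st i) := by
  obtain ⟨stack, ans, lc⟩ := st
  cases stack with
  | nil =>
    simp only [stepMax, stepMin, negSt, negL, negE, List.map_nil, List.map_cons,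
      pyGetD_neg_map]
  | cons e rest =>
    obtain ⟨v, p⟩ := e
    set x := PySem.List.pyGetD arr i 0 with hxdef
    simp only [stepMax, stepMin, negSt, negL, List.map_cons, negE, pyGetD_neg_map, ← hxdef]
    by_cases hle : v ≤ x
    · rw [if_pos (show -v ≥ -x by omega), if_pos hle]
      simp only [List.map_cons, Prod.mk.injEq]
      refine ⟨?_, ?_, ?_⟩ <;> first | rfl | trivial | ring
    · rw [if_neg (show ¬ (-v ≥ -x) by omega), if_neg hle]
      rw [if_pos (show -v < -x by omega), if_pos (show v > x by omega)]
      have hpop := popMin_neg x ((v, p) :: rest) (v, p) (v, p) (lc + x)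
      rcases hpm : popMin x ((v, p) :: rest) (v, p) (v, p) (lc + x) with ⟨S', b', n', lc2⟩
      rw [hpm] at hpop
      simp only [negL, List.map_cons, negE] at hpop
      have harith : -lc + -x = -(lc + x) := by ring
      rw [harith, hpop]
      cases S' with
      | nil =>
        dsimp only
        rw [if_pos (by simp), if_pos rfl]
        simp only [List.map_cons, List.map_nil, Prod.mk.injEq]
        refine ⟨?_, ?_, ?_⟩ <;> first | rfl | trivial | ring
      | cons e2 S'' =>
        obtain ⟨v2, p2⟩ := e2
        dsimp only
        rw [if_neg (by simp), if_neg (by simp)]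
        simp only [List.map_cons, List.headD_cons, negE, Prod.mk.injEq]
        refine ⟨?_, ?_, ?_⟩ <;> first | rfl | trivial | ring
theorem foldMin_neg (arr : List Int) (l : List Int) :
    ∀ st, l.foldl (stepMax (arr.map (fun a => -a))) (negSt st)
      = negSt (l.foldl (stepMin arr) st) := by
  induction l with
  | nil => intro st; rfl
  | cons i l ih =>
    intro st
    simp only [List.foldl_cons]
    rw [stepMin_neg, ih]

theorem idxF_neg_map (arr : List Int) :
    idxF (arr.map (fun a => -a)) = fun n => -(idxF arr n) := by
  funext n
  exact pyGetD_neg_map arr (n : Int)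

-- ===== B's side: span specifications and the contribution identity =====

-- "previous span" specification: j is the nearest index left of k whose value does NOT
-- satisfy le' against v k (-1 when every earlier value does)
def prevP (le' : Int → Int → Prop) (v : Nat → Int) (k : Nat) (j : Int) : Prop :=
  -1 ≤ j ∧ j < (k : Int) ∧ (j = -1 ∨ ¬ le' (v j.toNat) (v k)) ∧
    ∀ q : Nat, j < (q : Int) → q < k → le' (v q) (v k)

-- "next span" specification: j is the nearest index right of k with lt' (v k) (v j) (n when none)
def nextP (lt' : Int → Int → Prop) (v : Nat → Int) (n k : Nat) (j : Int) : Prop :=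
  (k : Int) < j ∧ j ≤ (n : Int) ∧ (j = (n : Int) ∨ lt' (v k) (v j.toNat)) ∧
    ∀ q : Nat, (k : Int) < (q : Int) → (q : Int) < j → ¬ lt' (v k) (v q)

theorem prevP_unique (le' : Int → Int → Prop) (v : Nat → Int) (k : Nat) {j1 j2 : Int}
    (h1 : prevP le' v k j1) (h2 : prevP le' v k j2) : j1 = j2 := by
  obtain ⟨a1, b1, c1, d1⟩ := h1
  obtain ⟨a2, b2, c2, d2⟩ := h2
  by_contra hne
  rcases lt_trichotomy j1 j2 with h | h | h
  · have hq := d1 j2.toNat (by omega) (by omega)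
    rcases c2 with h' | h'
    · omega
    · exact h' hq
  · exact hne h
  · have hq := d2 j1.toNat (by omega) (by omega)
    rcases c1 with h' | h'
    · omega
    · exact h' hq

-- the stack entries of model f t are linked by previous-greater-or-equal pointers
def chainP (f : Nat → Int) : List (Int × Int) → Prop
  | [] => True
  | [e] => prevP (· < ·) f e.2.toNat (-1)
  | e :: e2 :: r => prevP (· < ·) f e.2.toNat e2.2 ∧ chainP f (e2 :: r)

theorem chainP_tail (f : Nat → Int) (e : Int × Int) (rest : List (Int × Int)) :
    chainP f (e :: rest) → chainP f rest := by
  cases rest with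
  | nil => intro _; trivial
  | cons e2 r => exact fun h => h.2

theorem chainP_suffix (f : Nat → Int) :
    ∀ (pre S : List (Int × Int)), chainP f (pre ++ S) → chainP f S := by
  intro pre
  induction pre with
  | nil => intro S h; simpa using h
  | cons e p ih => exact fun S h => ih S (chainP_tail f e _ h)

theorem le_mxUp (f : Nat → Int) (s : Nat) : ∀ d, f s ≤ mxUp f s d := by
  intro d
  induction d with
  | zero => simp [mxUp]
  | succ d ih => exact le_trans ih (le_max_left _ _)

theorem model_entry_val (f : Nat → Int) (t : Nat) : ∀ e ∈ model f t, e.1 = f e.2.toNat := by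
  induction t with
  | zero => intro e he; simp [model] at he; simp [he]
  | succ t ih =>
    intro e he
    simp only [model, List.mem_cons] at he
    rcases he with rfl | he
    · show f (t + 1) = f ((t : Int) + 1).toNat
      rw [show ((t : Int) + 1).toNat = t + 1 from by omega]
    · exact ih e ((List.dropWhile_suffix _).subset he)

theorem prevP_posTop_dW (f : Nat → Int) (t : Nat) :
    prevP (· < ·) f (t + 1) (posTop (dW (f (t + 1)) (model f t))) := by
  have hgood := model_good f t
  have hgD := goodS_dW (f (t + 1)) _ hgood
  have hb := neg_one_le_posTop _ hgD
  have hle := posTop_dW_le (f (t + 1)) _ hgood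
  rw [model_posTop] at hle
  refine ⟨hb, by push_cast; omega, ?_, ?_⟩
  · cases hD : dW (f (t + 1)) (model f t) with
    | nil => left; rfl
    | cons e r =>
      right
      have hx := dW_head_ge (f (t + 1)) (model f t) e r hD
      have hv := model_entry_val f t e
        ((List.dropWhile_suffix _).subset (hD ▸ List.mem_cons_self))
      have hpt : posTop (e :: r) = e.2 := rfl
      rw [hpt]
      omega
  · intro q hq1 hq2
    have hq3 : q ≤ t := by omega
    have h1 := le_mxUp f q (t - q)
    have h2 := lookV_model f t q hq3
    have h3 := lookV_dropped (f (t + 1)) (q : Int) (model f t) hq1 (by omega)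
      (by rw [model_posTop]; omega)
    omega

theorem chainP_model (f : Nat → Int) (t : Nat) : chainP f (model f t) := by
  induction t with
  | zero =>
    show prevP (· < ·) f ((0 : Int)).toNat (-1)
    refine ⟨le_refl _, by norm_num, Or.inl rfl, ?_⟩
    intro q hq1 hq2
    omega
  | succ t ih =>
    have hP := prevP_posTop_dW f t
    have hcast : ((t : Int) + 1).toNat = t + 1 := by omega
    cases hD : dW (f (t + 1)) (model f t) with
    | nil =>
      show chainP f ((f (t + 1), (t : Int) + 1) :: dW (f (t + 1)) (model f t))
      rw [hD]
      show prevP (· < ·) f ((t : Int) + 1).toNat (-1)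
      rw [hD] at hP
      rw [hcast]
      exact hP
    | cons e r =>
      show chainP f ((f (t + 1), (t : Int) + 1) :: dW (f (t + 1)) (model f t))
      rw [hD]
      constructor
      · show prevP (· < ·) f ((t : Int) + 1).toNat e.2
        rw [hD] at hP
        rw [hcast]
        exact hP
      · obtain ⟨pre, hpre⟩ := List.dropWhile_suffix (fun e : Int × Int => decide (e.1 < f (t + 1))) (l := model f t)
        have hD2 : pre ++ (e :: r) = model f t := by rw [← hD]; exact hpre
        exact chainP_suffix f pre _ (hD2 ▸ ih)

theorem Wsum_eq_listsum (f : Nat → Int) (n : Nat) (J : Nat → Int)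
    (hJ : ∀ k, k < n → prevP (· < ·) f k (J k)) :
    ∀ S : List (Int × Int), chainP f S → (∀ e ∈ S, e.2.toNat < n) →
      Wsum S = (S.map (fun e => e.1 * (e.2 - J e.2.toNat))).sum := by
  intro S
  induction S with
  | nil => intro _ _; simp [Wsum]
  | cons e rest ih =>
    intro hch hsh
    have hJe := hJ e.2.toNat (hsh e List.mem_cons_self)
    have hlink : prevP (· < ·) f e.2.toNat (posTop rest) := by
      cases rest with
      | nil => exact hch
      | cons e2 r => exact hch.1
    have huniq : J e.2.toNat = posTop rest := prevP_unique _ _ _ hJe hlink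
    have hW : Wsum (e :: rest) = e.1 * (e.2 - posTop rest) + Wsum rest := rfl
    rw [hW, List.map_cons, List.sum_cons,
        ih (chainP_tail f e rest hch) (fun e' he' => hsh e' (List.mem_cons_of_mem _ he')),
        huniq]

theorem head_le_of_goodS (e : Int × Int) (rest : List (Int × Int)) (h : goodS (e :: rest)) :
    ∀ e' ∈ rest, e.1 ≤ e'.1 := by
  induction rest generalizing e with
  | nil => intro e' he'; simp at he'
  | cons e2 r ih =>
    intro e' he'
    have h12 : e.1 ≤ e2.1 := (List.isChain_cons_cons.mp h.1).1.2
    rcases List.mem_cons.mp he' with rfl | he'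
    · exact h12
    · exact le_trans h12 (ih e2 (goodS_tail _ _ h) e' he')

theorem dW_eq_filter (x : Int) : ∀ S : List (Int × Int), goodS S →
    dW x S = S.filter (fun e => decide (x ≤ e.1)) := by
  intro S
  induction S with
  | nil => intro _; rfl
  | cons e rest ih =>
    intro hg
    obtain ⟨v, p⟩ := e
    by_cases hv : v < x
    · rw [dW_cons, if_pos hv, List.filter_cons, ih (goodS_tail _ _ hg)]
      have hnle : ¬ x ≤ v := by omega
      simp [hnle]
    · rw [dW_cons, if_neg hv, List.filter_cons]
      have hall : ∀ e' ∈ rest, x ≤ e'.1 := by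
        intro e' he'
        have := head_le_of_goodS (v, p) rest hg e' he'
        simp only at this
        omega
      rw [List.filter_eq_self.mpr (fun e' he' => by simpa using hall e' he')]
      simp [(by omega : x ≤ v)]

theorem sum_map_filter {α : Type} (p : α → Bool) (m : α → Int) :
    ∀ S : List α, ((S.filter p).map m).sum = (S.map (fun e => if p e then m e else 0)).sum := by
  intro S
  induction S with
  | nil => rfl
  | cons e rest ih =>
    rw [List.filter_cons]
    by_cases hp : p e
    · simp [hp, ih]
    · simp [hp, ih]

theorem G_step (f : Nat → Int) (n : Nat) (G : Nat → Int)
    (hG : ∀ k, k < n → nextP (· < ·) f n k (G k)) (k t : Nat) (hk : k ≤ t) (ht : t + 1 < n) :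
    ((t + 1 : Nat) : Int) < G k ↔ ((t : Int) < G k ∧ f (t + 1) ≤ f k) := by
  obtain ⟨c1, c2, c3, c4⟩ := hG k (by omega)
  constructor
  · intro h
    refine ⟨by push_cast at h ⊢; omega, ?_⟩
    have := c4 (t + 1) (by push_cast; omega) h
    omega
  · rintro ⟨h1, h2⟩
    by_contra hcon
    have hGt : G k = ((t + 1 : Nat) : Int) := by push_cast at hcon ⊢; omega
    rcases c3 with h' | h'
    · push_cast at hGt h'; omega
    · rw [hGt] at h'
      have : ((((t + 1 : Nat) : Int)).toNat) = t + 1 := by omega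
      rw [this] at h'
      omega

theorem listsum_model (f : Nat → Int) (n : Nat) (G : Nat → Int)
    (hG : ∀ k, k < n → nextP (· < ·) f n k (G k)) :
    ∀ t, t < n → ∀ h : Nat → Int,
      ((model f t).map (fun e => h e.2.toNat)).sum
        = ∑ k ∈ Finset.range (t + 1), if (t : Int) < G k then h k else 0 := by
  intro t
  induction t with
  | zero =>
    intro ht h
    have h0 : (0 : Int) < G 0 := by exact_mod_cast (hG 0 ht).1
    simp [model, h0]
  | succ t ih =>
    intro ht h
    have hmodel : model f (t + 1)
        = (f (t + 1), (t : Int) + 1) :: dW (f (t + 1)) (model f t) := rfl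
    rw [hmodel, List.map_cons, List.sum_cons,
        dW_eq_filter (f (t + 1)) (model f t) (model_good f t), sum_map_filter]
    have hcast : ((t : Int) + 1).toNat = t + 1 := by omega
    have hmapcongr : (model f t).map
          (fun e => if decide (f (t + 1) ≤ e.1) then h e.2.toNat else 0)
        = (model f t).map (fun e => (fun k => if f (t + 1) ≤ f k then h k else 0) e.2.toNat) := by
      apply List.map_congr_left
      intro e he
      rw [model_entry_val f t e he]
      simp
    rw [hmapcongr, ih (by omega) (fun k => if f (t + 1) ≤ f k then h k else 0)]
    have hstep : ∀ k ∈ Finset.range (t + 1),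
        (if (t : Int) < G k then (if f (t + 1) ≤ f k then h k else 0) else 0)
          = (if ((t + 1 : Nat) : Int) < G k then h k else 0) := by
      intro k hk
      simp only [Finset.mem_range] at hk
      have hiff := G_step f n G hG k t (by omega) ht
      by_cases hc : ((t + 1 : Nat) : Int) < G k
      · obtain ⟨h1, h2⟩ := hiff.mp hc
        rw [if_pos hc, if_pos h1, if_pos h2]
      · rw [if_neg hc]
        by_cases h1 : (t : Int) < G k
        · rw [if_pos h1, if_neg (fun h2 => hc (hiff.mpr ⟨h1, h2⟩))]
        · rw [if_neg h1]
    rw [Finset.sum_congr rfl hstep, hcast,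
        Finset.sum_range_succ (fun k => if ((t + 1 : Nat) : Int) < G k then h k else 0) (t + 1)]
    rw [if_pos (by exact_mod_cast (hG (t + 1) ht).1)]
    ring

theorem contribution (f : Nat → Int) (n : Nat) (J G : Nat → Int)
    (hJ : ∀ k, k < n → prevP (· < ·) f k (J k))
    (hG : ∀ k, k < n → nextP (· < ·) f n k (G k)) :
    ∑ t ∈ Finset.range n, Wsum (model f t)
      = ∑ k ∈ Finset.range n, f k * ((k : Int) - J k) * (G k - (k : Int)) := by
  have h1 : ∀ t ∈ Finset.range n, Wsum (model f t)
      = ∑ k ∈ Finset.range (t + 1),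
          if (t : Int) < G k then f k * ((k : Int) - J k) else 0 := by
    intro t ht
    simp only [Finset.mem_range] at ht
    have hbound : ∀ e ∈ model f t, e.2.toNat < n := by
      intro e he
      have h1 := model_pos_le f t e he
      have h2 := (model_good f t).2 e he
      omega
    rw [Wsum_eq_listsum f n J hJ (model f t) (chainP_model f t) hbound]
    have hmc : (model f t).map (fun e => e.1 * (e.2 - J e.2.toNat))
        = (model f t).map (fun e => (fun k => f k * ((k : Int) - J k)) e.2.toNat) := by
      apply List.map_congr_left
      intro e he
      rw [model_entry_val f t e he]
      have h2 := (model_good f t).2 e he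
      have : e.2 = ((e.2.toNat : Nat) : Int) := by omega
      rw [this]
      simp
    rw [hmc, listsum_model f n G hG t ht (fun k => f k * ((k : Int) - J k))]
  rw [Finset.sum_congr rfl h1]
  have h2 : ∀ t ∈ Finset.range n,
      (∑ k ∈ Finset.range (t + 1), if (t : Int) < G k then f k * ((k : Int) - J k) else 0)
        = ∑ k ∈ Finset.range n,
            if k ≤ t then (if (t : Int) < G k then f k * ((k : Int) - J k) else 0) else 0 := by
    intro t ht
    simp only [Finset.mem_range] at ht
    have hsub : Finset.range (t + 1) ⊆ Finset.range n := by
      intro x hx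
      simp only [Finset.mem_range] at hx ⊢
      omega
    have e1 : (∑ k ∈ Finset.range (t + 1), if (t : Int) < G k then f k * ((k : Int) - J k) else 0)
        = ∑ k ∈ Finset.range (t + 1),
            (if k ≤ t then (if (t : Int) < G k then f k * ((k : Int) - J k) else 0) else 0) :=
      Finset.sum_congr rfl (fun k hk => by
        rw [if_pos (show k ≤ t from by simp only [Finset.mem_range] at hk; omega)])
    rw [e1]
    exact Finset.sum_subset hsub (fun k _ hk => by
      rw [if_neg (show ¬ k ≤ t from by simp only [Finset.mem_range] at hk; omega)])
  rw [Finset.sum_congr rfl h2, Finset.sum_comm]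
  refine Finset.sum_congr rfl (fun k hk => ?_)
  simp only [Finset.mem_range] at hk
  obtain ⟨c1, c2, c3, c4⟩ := hG k hk
  have hmerge : ∀ t ∈ Finset.range n,
      (if k ≤ t then (if (t : Int) < G k then f k * ((k : Int) - J k) else 0) else 0)
        = if (k ≤ t ∧ (t : Int) < G k) then f k * ((k : Int) - J k) else 0 := by
    intro t _
    by_cases ha : k ≤ t
    · by_cases hb : (t : Int) < G k
      · rw [if_pos ha, if_pos hb, if_pos ⟨ha, hb⟩]
      · rw [if_pos ha, if_neg hb, if_neg (fun h => hb h.2)]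
    · rw [if_neg ha, if_neg (fun h => ha h.1)]
  rw [Finset.sum_congr rfl hmerge, ← Finset.sum_filter]
  have hfil : (Finset.range n).filter (fun t => k ≤ t ∧ (t : Int) < G k)
      = Finset.Ico k (G k).toNat := by
    ext t
    simp only [Finset.mem_filter, Finset.mem_range, Finset.mem_Ico]
    omega
  rw [hfil, Finset.sum_const, Nat.card_Ico, nsmul_eq_mul]
  have : (((G k).toNat - k : Nat) : Int) = G k - (k : Int) := by omega
  rw [this]
  ring

-- ===== B's loops compute the span specifications =====

theorem jump_spec (less : Int → Int → Bool) (le' : Int → Int → Prop)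
    (hiff : ∀ a b, less a b = true ↔ le' a b)
    (htr : ∀ a b c, le' a b → le' b c → le' a c)
    (vals res : List Int) (k : Nat)
    (hres : ∀ m : Nat, m < k → prevP le' (idxF vals) m (PySem.List.pyGetD res (m : Int) 0)) :
    ∀ (fuel : Nat) (j : Int), -1 ≤ j → j < (k : Int) → j + 2 ≤ (fuel : Int) →
      (∀ q : Nat, j < (q : Int) → q < k → le' (idxF vals q) (idxF vals k)) →
      prevP le' (idxF vals) k (jump less vals res (PySem.List.pyGetD vals (k : Int) 0) fuel j) := by
  intro fuel
  induction fuel with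
  | zero =>
    intro j h1 h2 h3 h4
    exfalso
    push_cast at h3
    omega
  | succ fuel ih =>
    intro j h1 h2 h3 h4
    rw [jump]
    by_cases hc : 0 ≤ j ∧ less (PySem.List.pyGetD vals j 0) (PySem.List.pyGetD vals (k : Int) 0) = true
    · rw [if_pos hc]
      obtain ⟨hj0, hless⟩ := hc
      have hjk : le' (idxF vals j.toNat) (idxF vals k) := by
        apply (hiff _ _).mp
        show less (PySem.List.pyGetD vals ((j.toNat : Nat) : Int) 0)
            (PySem.List.pyGetD vals (k : Int) 0) = true
        rw [show ((j.toNat : Nat) : Int) = j from by omega]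
        exact hless
      have hprev := hres j.toNat (by omega)
      obtain ⟨p1, p2, p3, p4⟩ := hprev
      rw [show j = ((j.toNat : Nat) : Int) from by omega]
      apply ih (PySem.List.pyGetD res ((j.toNat : Nat) : Int) 0) p1 (by omega)
        (by push_cast at h3 ⊢; omega)
      intro q hq1 hq2
      by_cases hqm : q < j.toNat
      · exact htr _ _ _ (p4 q hq1 hqm) hjk
      · by_cases hqe : q = j.toNat
        · rw [hqe]; exact hjk
        · exact h4 q (by omega) hq2
    · rw [if_neg hc]
      refine ⟨h1, h2, ?_, h4⟩
      by_cases hj : j = -1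
      · exact Or.inl hj
      · right
        intro hle
        apply hc
        refine ⟨by omega, ?_⟩
        show less (PySem.List.pyGetD vals j 0) (PySem.List.pyGetD vals (k : Int) 0) = true
        rw [show j = ((j.toNat : Nat) : Int) from by omega]
        exact (hiff _ _).mpr hle

theorem prevSpan_spec (less : Int → Int → Bool) (le' : Int → Int → Prop)
    (hiff : ∀ a b, less a b = true ↔ le' a b)
    (htr : ∀ a b c, le' a b → le' b c → le' a c) (vals : List Int) :
    ∀ n : Nat, (prevSpan less vals (n : Int)).length = n ∧
      ∀ m : Nat, m < n →
        prevP le' (idxF vals) m (PySem.List.pyGetD (prevSpan less vals (n : Int)) (m : Int) 0) := by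
  intro n
  induction n with
  | zero =>
    constructor
    · rw [prevSpan, show ((0 : Nat) : Int) = 0 from rfl,
          PySem.List.pyRange_one_eq_nil le_rfl]
      rfl
    · intro m hm; omega
  | succ n ih =>
    obtain ⟨ihlen, ihprop⟩ := ih
    have hunf : prevSpan less vals ((n + 1 : Nat) : Int)
        = prevSpan less vals (n : Int)
          ++ [jump less vals (prevSpan less vals (n : Int))
                (PySem.List.pyGetD vals (n : Int) 0) ((n : Int) + 1).toNat ((n : Int) - 1)] := by
      rw [prevSpan, prevSpan, show ((n + 1 : Nat) : Int) = (n : Int) + 1 from by push_cast; ring,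
          PySem.List.pyRange_one_succ_right (by positivity), List.foldl_append]
      rfl
    have hj : prevP le' (idxF vals) n
        (jump less vals (prevSpan less vals (n : Int))
          (PySem.List.pyGetD vals (n : Int) 0) ((n : Int) + 1).toNat ((n : Int) - 1)) := by
      apply jump_spec less le' hiff htr vals _ n ihprop ((n : Int) + 1).toNat ((n : Int) - 1)
        (by omega) (by omega) (by omega)
      intro q hq1 hq2
      exfalso
      omega
    constructor
    · rw [hunf, List.length_append, ihlen]
      rfl
    · intro m hm
      rw [hunf]
      by_cases hmn : m < n
      · have : PySem.List.pyGetD (prevSpan less vals (n : Int)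
              ++ [jump less vals (prevSpan less vals (n : Int))
                    (PySem.List.pyGetD vals (n : Int) 0) ((n : Int) + 1).toNat ((n : Int) - 1)])
            (m : Int) 0
            = PySem.List.pyGetD (prevSpan less vals (n : Int)) (m : Int) 0 := by
          simp only [PySem.List.pyGetD_natCast, List.getD_eq_getElem?_getD]
          rw [List.getElem?_append_left (by omega)]
        rw [this]
        exact ihprop m hmn
      · have hmn' : m = n := by omega
        subst hmn'
        have : PySem.List.pyGetD (prevSpan less vals (m : Int)
              ++ [jump less vals (prevSpan less vals (m : Int))
                    (PySem.List.pyGetD vals (m : Int) 0) ((m : Int) + 1).toNat ((m : Int) - 1)])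
            (m : Int) 0
            = jump less vals (prevSpan less vals (m : Int))
                (PySem.List.pyGetD vals (m : Int) 0) ((m : Int) + 1).toNat ((m : Int) - 1) := by
          simp only [PySem.List.pyGetD_natCast, List.getD_eq_getElem?_getD]
          rw [List.getElem?_append_right (by omega), ihlen]
          simp
        rw [this]
        exact hj

-- reading the reversed prefix
theorem idxF_rev (arr : List Int) (n : Nat) (hn : n ≤ arr.length) (m : Nat) (hm : m < n) :
    idxF ((PySem.List.slice arr none (some (n : Int))).reverse) m = idxF arr (n - 1 - m) := by
  rw [PySem.List.slice_to_natCast]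
  show PySem.List.pyGetD (arr.take n).reverse ((m : Nat) : Int) 0
      = PySem.List.pyGetD arr ((n - 1 - m : Nat) : Int) 0
  simp only [PySem.List.pyGetD_natCast, List.getD_eq_getElem?_getD]
  have hlen : (arr.take n).length = n := by simp; omega
  rw [List.getElem?_reverse (by omega), hlen, List.getElem?_take_of_lt (by omega)]

theorem nextP_of_rev (le' lt' : Int → Int → Prop) (hrel : ∀ a b, ¬ le' a b ↔ lt' b a)
    (f v : Nat → Int) (n k : Nat) (hk : k < n)
    (hv : ∀ m, m < n → v m = f (n - 1 - m))
    (j : Int) (hp : prevP le' v (n - 1 - k) j) :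
    nextP lt' f n k ((n : Int) - 1 - j) := by
  obtain ⟨p1, p2, p3, p4⟩ := hp
  refine ⟨by omega, by omega, ?_, ?_⟩
  · by_cases hj : j = -1
    · left; omega
    · right
      rcases p3 with h | h
      · exact absurd h hj
      · have hjn : j.toNat < n := by omega
        rw [hv j.toNat hjn, hv (n - 1 - k) (by omega)] at h
        have e2 : n - 1 - (n - 1 - k) = k := by omega
        rw [e2] at h
        have e3 : ((n : Int) - 1 - j).toNat = n - 1 - j.toNat := by omega
        rw [e3]
        exact (hrel _ _).mp h
  · intro q hq1 hq2
    have := p4 (n - 1 - q) (by omega) (by omega)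
    rw [hv (n - 1 - q) (by omega), hv (n - 1 - k) (by omega)] at this
    have e1 : n - 1 - (n - 1 - q) = q := by omega
    have e2 : n - 1 - (n - 1 - k) = k := by omega
    rw [e1, e2] at this
    exact fun hl => ((hrel _ _).mpr hl) this

-- negation bridges for the min side
theorem prevP_neg (f : Nat → Int) (k : Nat) (j : Int) (h : prevP (· > ·) f k j) :
    prevP (· < ·) (fun m => -(f m)) k j := by
  obtain ⟨a, b, c, d⟩ := h
  refine ⟨a, b, ?_, ?_⟩
  · rcases c with h' | h'
    · exact Or.inl h'
    · right; simp only; omega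
  · intro q h1 h2
    have := d q h1 h2
    simp only
    omega

theorem nextP_neg (f : Nat → Int) (n k : Nat) (j : Int) (h : nextP (· > ·) f n k j) :
    nextP (· < ·) (fun m => -(f m)) n k j := by
  obtain ⟨a, b, c, d⟩ := h
  refine ⟨a, b, ?_, ?_⟩
  · rcases c with h' | h'
    · exact Or.inl h'
    · right; simp only; omega
  · intro q h1 h2
    have := d q h1 h2
    simp only
    omega

-- the final accumulation loop is a pair of sums
theorem foldPairs (Fa Fb : Int → Int) : ∀ n : Nat,
    (PySem.List.pyRange 0 (n : Int) 1).foldl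
        (fun (acc : Int × Int) k => (acc.1 + Fa k, acc.2 + Fb k)) (0, 0)
      = (∑ k ∈ Finset.range n, Fa (k : Int), ∑ k ∈ Finset.range n, Fb (k : Int)) := by
  intro n
  induction n with
  | zero =>
    rw [show ((0 : Nat) : Int) = 0 from rfl, PySem.List.pyRange_one_eq_nil le_rfl]
    simp
  | succ n ih =>
    rw [show ((n + 1 : Nat) : Int) = (n : Int) + 1 from by push_cast; ring,
        PySem.List.pyRange_one_succ_right (by positivity), List.foldl_append, ih]
    simp only [List.foldl_cons, List.foldl_nil]
    rw [Finset.sum_range_succ (fun k => Fa (k : Int)) n,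
        Finset.sum_range_succ (fun k => Fb (k : Int)) n]

-- ===== VERDICT (by name: the statement is the Claim_ definition above) =====
theorem solve_spec : Claim_equal_solve := by
  intro N arr _hdom hpre
  obtain ⟨hne, hlen⟩ := hpre
  show solve N arr = solve_alt N arr
  have hlen1 : 1 ≤ (arr.length : Int) := by
    have := List.length_pos_iff.mpr hne
    omega
  set nn : Nat := (max N 1).toNat with hnn
  have hmaxN : max N 1 = (nn : Int) := by omega
  have hnn1 : 1 ≤ nn := by omega
  have hnnlen : nn ≤ arr.length := by omega
  set n' : Nat := nn - 1 with hn'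
  have hnn' : n' + 1 = nn := by omega
  set f := idxF arr with hf
  set g := idxF (arr.map (fun a => -a)) with hg
  have hgf : g = fun n => -(f n) := idxF_neg_map arr
  have ha0 : PySem.List.pyGetD arr 0 0 = f 0 := by
    rw [hf]
    show _ = PySem.List.pyGetD arr ((0 : Nat) : Int) 0
    norm_num
  have hrange : PySem.List.pyRange 1 N 1 = PySem.List.pyRange 1 ((n' : Int) + 1) 1 := by
    by_cases h : 1 ≤ N
    · have hN : N = (n' : Int) + 1 := by omega
      rw [hN]
    · rw [PySem.List.pyRange_one_eq_nil (by omega : N ≤ 1),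
          PySem.List.pyRange_one_eq_nil (by omega : (n' : Int) + 1 ≤ 1)]
  -- A's max pass
  have hmax := foldA arr n'
  -- A's min pass via negation
  have hminfold := foldMin_neg arr (PySem.List.pyRange 1 ((n' : Int) + 1) 1)
      ([(f 0, 0)], f 0, f 0)
  have hneginit : negSt ([(f 0, 0)], f 0, f 0) = ([(g 0, 0)], g 0, g 0) := by
    simp [negSt, negL, negE, hgf]
  rw [hneginit, foldA (arr.map (fun a => -a)) n'] at hminfold
  rcases hR : (PySem.List.pyRange 1 ((n' : Int) + 1) 1).foldl (stepMin arr)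
      ([(f 0, 0)], f 0, f 0) with ⟨Rs, Ra, Rl⟩
  rw [hR] at hminfold
  have hRa : Ra = -(∑ t ∈ Finset.range (n' + 1), Wsum (model g t)) := by
    have h := hminfold
    rw [show negSt (Rs, Ra, Rl) = (negL Rs, -Ra, -Rl) from rfl] at h
    simp only [Prod.mk.injEq] at h
    obtain ⟨-, h2, -⟩ := h
    rw [hg]
    omega
  have hsolve : solve N arr
      = (∑ t ∈ Finset.range (n' + 1), Wsum (model f t), Ra) := by
    simp only [solve, ha0]
    rw [hrange, hmax, hR]
  -- B evaluated: the span lists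
  have hpge := prevSpan_spec (fun a b => a < b) (· < ·) (fun a b => by simp)
      (fun a b c h1 h2 => lt_trans h1 h2) arr nn
  have hple := prevSpan_spec (fun a b => a > b) (· > ·) (fun a b => by simp)
      (fun a b c h1 h2 => gt_trans h1 h2) arr nn
  have hrgt := prevSpan_spec (fun a b => a ≤ b) (· ≤ ·) (fun a b => by simp)
      (fun a b c h1 h2 => le_trans h1 h2) ((PySem.List.slice arr none (some (nn : Int))).reverse) nn
  have hrlt := prevSpan_spec (fun a b => a ≥ b) (· ≥ ·) (fun a b => by simp)
      (fun a b c h1 h2 => ge_trans h1 h2) ((PySem.List.slice arr none (some (nn : Int))).reverse) nn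
  have hJ1 : ∀ k, k < nn → prevP (· < ·) f k
      (PySem.List.pyGetD (prevSpan (fun a b => a < b) arr (nn : Int)) (k : Int) 0) :=
    fun k hk => hpge.2 k hk
  have hJ2 : ∀ k, k < nn → prevP (· < ·) g k
      (PySem.List.pyGetD (prevSpan (fun a b => a > b) arr (nn : Int)) (k : Int) 0) := by
    intro k hk
    rw [hgf]
    exact prevP_neg f k _ (hple.2 k hk)
  have hG1 : ∀ k, k < nn → nextP (· < ·) f nn k
      ((nn : Int) - 1 - PySem.List.pyGetD
        (prevSpan (fun a b => a ≤ b) ((PySem.List.slice arr none (some (nn : Int))).reverse) (nn : Int))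
        ((nn : Int) - 1 - (k : Int)) 0) := by
    intro k hk
    rw [show ((nn : Int) - 1 - (k : Int)) = ((nn - 1 - k : Nat) : Int) from by omega]
    exact nextP_of_rev (· ≤ ·) (· < ·) (fun a b => not_le) f
      (idxF ((PySem.List.slice arr none (some (nn : Int))).reverse)) nn k hk
      (fun m hm => idxF_rev arr nn hnnlen m hm) _ (hrgt.2 (nn - 1 - k) (by omega))
  have hG2 : ∀ k, k < nn → nextP (· < ·) g nn k
      ((nn : Int) - 1 - PySem.List.pyGetD
        (prevSpan (fun a b => a ≥ b) ((PySem.List.slice arr none (some (nn : Int))).reverse) (nn : Int))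
        ((nn : Int) - 1 - (k : Int)) 0) := by
    intro k hk
    rw [show ((nn : Int) - 1 - (k : Int)) = ((nn - 1 - k : Nat) : Int) from by omega]
    rw [hgf]
    apply nextP_neg
    exact nextP_of_rev (· ≥ ·) (· > ·) (fun a b => ⟨fun h => by omega, fun h => by omega⟩) f
      (idxF ((PySem.List.slice arr none (some (nn : Int))).reverse)) nn k hk
      (fun m hm => idxF_rev arr nn hnnlen m hm) _ (hrlt.2 (nn - 1 - k) (by omega))
  have hCmax := contribution f nn
      (fun k => PySem.List.pyGetD (prevSpan (fun a b => a < b) arr (nn : Int)) (k : Int) 0)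
      (fun k => (nn : Int) - 1 - PySem.List.pyGetD
        (prevSpan (fun a b => a ≤ b) ((PySem.List.slice arr none (some (nn : Int))).reverse) (nn : Int))
        ((nn : Int) - 1 - (k : Int)) 0)
      hJ1 hG1
  have hCmin := contribution g nn
      (fun k => PySem.List.pyGetD (prevSpan (fun a b => a > b) arr (nn : Int)) (k : Int) 0)
      (fun k => (nn : Int) - 1 - PySem.List.pyGetD
        (prevSpan (fun a b => a ≥ b) ((PySem.List.slice arr none (some (nn : Int))).reverse) (nn : Int))
        ((nn : Int) - 1 - (k : Int)) 0)
      hJ2 hG2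
  rw [hsolve]
  simp only [solve_alt, hmaxN]
  rw [foldPairs]
  simp only [Prod.mk.injEq]
  constructor
  · rw [hnn', hCmax]
    refine Finset.sum_congr rfl (fun k _ => ?_)
    simp only [hf, idxF]
  · rw [hRa, hnn', hCmin, ← Finset.sum_neg_distrib]
    refine Finset.sum_congr rfl (fun k _ => ?_)
    simp only [hgf, hf, idxF]
    ring
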